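-- pv_equiv track=rewrite | github.com/Mussylman/speed_limit | src/plate_recognizer.py | _kz_score
-- ===== SOURCE A (Python) =====
-- def _kz_score(text: str) -> int:
--     """Оценка соответствия KZ формату (0-8, больше = лучше)."""
--     if len(text) != 8:
--         return 0
--     score = 0
--     for i in range(3):
--         if text[i].isdigit():
--             score += 1
--     for i in range(3, 6):
--         if text[i].isalpha():
--             score += 1
--     for i in range(6, 8):
--         if text[i].isdigit():
--             score += 1
--     return score
-- ===== SOURCE B (Python) =====
-- def _kz_score(text: str) -> int:
--     """Оценка соответствия KZ формату (0-8, больше = лучше)."""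
--     if len(text) != 8:
--         return 0
--     # Build two 8-bit masks (MSB = position 0): digit positions and letter positions,
--     # then score = popcount of the masks intersected with the KZ format masks.
--     dmask = 0
--     amask = 0
--     for c in text:
--         dmask = (dmask << 1) | c.isdigit()
--         amask = (amask << 1) | c.isalpha()
--     return (dmask & 0b11100011).bit_count() + (amask & 0b00011100).bit_count()
-- ===== Notes on version B (the rewrite author's own statement) =====
-- stated objective: alternative
-- what changed: Instead of counting per index range, B encodes the string as two 8-bit masks (digit positions, letter positions) in one pass and scores via popcount of the masks ANDed with the KZ format masks 0b11100011 and 0b00011100.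
import Mathlib
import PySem

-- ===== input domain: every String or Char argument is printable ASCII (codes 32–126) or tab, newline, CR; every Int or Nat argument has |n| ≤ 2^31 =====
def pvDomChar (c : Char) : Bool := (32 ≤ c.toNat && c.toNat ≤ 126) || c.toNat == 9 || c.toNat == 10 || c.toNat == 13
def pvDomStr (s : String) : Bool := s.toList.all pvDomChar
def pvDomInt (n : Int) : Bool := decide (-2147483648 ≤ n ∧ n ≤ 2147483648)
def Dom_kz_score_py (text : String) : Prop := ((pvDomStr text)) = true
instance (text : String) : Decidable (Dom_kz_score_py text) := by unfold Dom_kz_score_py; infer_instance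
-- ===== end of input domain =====

-- B replaces A's three hardcoded index-range loops with a bitmask encoding: one
-- pass builds 8-bit digit/letter position masks, then the score is the popcount
-- of the masks ANDed with the KZ format masks (objective: alternative).


-- ===== PORT A =====
-- literal port: guard len ≠ 8, then three range loops accumulating `score`
def kz_score_py (text : String) : Int :=
  let cs := text.toList
  if PySem.Str.len text ≠ 8 then 0
  else
    let score : Int := 0
    let score := (PySem.List.pyRange 0 3 1).foldl
      (fun sc i => if ((PySem.List.pyGet? cs i).map PySem.Chars.isdigit).getD false then sc + 1 else sc) score
    let score := (PySem.List.pyRange 3 6 1).foldl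
      (fun sc i => if ((PySem.List.pyGet? cs i).map PySem.Chars.isalpha).getD false then sc + 1 else sc) score
    let score := (PySem.List.pyRange 6 8 1).foldl
      (fun sc i => if ((PySem.List.pyGet? cs i).map PySem.Chars.isdigit).getD false then sc + 1 else sc) score
    score

-- ===== PORT B =====
-- popcount of a Nat, as Python's int.bit_count computes it on nonnegative ints
-- (sum of the binary digits); fuel = n makes the recursion structural, and
-- n halvings always reach 0, so it is exact.
def pvPopcntAux : Nat → Nat → Nat
  | 0, _ => 0
  | fuel + 1, n => if n = 0 then 0 else n % 2 + pvPopcntAux fuel (n / 2)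
def pvPopcnt (n : Nat) : Nat := pvPopcntAux n n

-- literal port of Source B: one pass builds the two 8-bit masks (MSB = position 0),
-- then popcount against the KZ format masks 0b11100011 / 0b00011100
def kz_score_py_alt (text : String) : Int :=
  if PySem.Str.len text ≠ 8 then 0
  else
    let m := text.toList.foldl
      (fun (p : Nat × Nat) c =>
        ((p.1 <<< 1) ||| (if PySem.Chars.isdigit c then 1 else 0),
         (p.2 <<< 1) ||| (if PySem.Chars.isalpha c then 1 else 0))) (0, 0)
    ((pvPopcnt (m.1 &&& 0b11100011) : Int) + (pvPopcnt (m.2 &&& 0b00011100) : Int))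

-- ===== PRECONDITION & SPEC =====
def Spec_kz_score_py (text : String) (out : Int) : Prop := out = kz_score_py_alt text
instance (text : String) (out : Int) : Decidable (Spec_kz_score_py text out) := by unfold Spec_kz_score_py; infer_instance

-- ===== CLAIM (what is proved, stated in full; the proofs are below) =====
def Claim_equal_kz_score_py : Prop := ∀ (text : String), Dom_kz_score_py text → Spec_kz_score_py text (kz_score_py text)

-- ===== LEMMAS AND PROOFS =====

-- popcount of the digit mask picks out exactly positions 0,1,2,6,7
theorem pv_popD (d0 d1 d2 d3 d4 d5 d6 d7 : Bool) :
    pvPopcnt (((((((((0 <<< 1 ||| if d0 then 1 else 0) <<< 1 ||| if d1 then 1 else 0) <<< 1 ||| if d2 then 1 else 0) <<< 1 ||| if d3 then 1 else 0) <<< 1 ||| if d4 then 1 else 0) <<< 1 ||| if d5 then 1 else 0) <<< 1 ||| if d6 then 1 else 0) <<< 1 ||| if d7 then 1 else 0) &&& 227)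
    = d0.toNat + d1.toNat + d2.toNat + d6.toNat + d7.toNat := by
  revert d0 d1 d2 d3 d4 d5 d6 d7; decide

-- popcount of the letter mask picks out exactly positions 3,4,5
theorem pv_popA (a0 a1 a2 a3 a4 a5 a6 a7 : Bool) :
    pvPopcnt (((((((((0 <<< 1 ||| if a0 then 1 else 0) <<< 1 ||| if a1 then 1 else 0) <<< 1 ||| if a2 then 1 else 0) <<< 1 ||| if a3 then 1 else 0) <<< 1 ||| if a4 then 1 else 0) <<< 1 ||| if a5 then 1 else 0) <<< 1 ||| if a6 then 1 else 0) <<< 1 ||| if a7 then 1 else 0) &&& 28)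
    = a3.toNat + a4.toNat + a5.toNat := by
  revert a0 a1 a2 a3 a4 a5 a6 a7; decide

-- A's conditional increment, written additively
theorem pv_ifAdd (b : Bool) (s : Int) : (if b then s + 1 else s) = s + (b.toNat : Int) := by
  cases b <;> simp

-- ===== VERDICT (by name: the statement is the Claim_ definition above) =====
theorem kz_score_py_spec : Claim_equal_kz_score_py := by
  intro text _
  unfold Spec_kz_score_py kz_score_py kz_score_py_alt
  by_cases h8 : PySem.Str.len text = 8
  · have hl : text.toList.length = 8 := by
      have h8' : (text.length : Int) = 8 := by simpa [PySem.Str.len] using h8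
      simpa using congrArg Int.toNat h8'
    rcases e : text.toList with _ | ⟨c0, _ | ⟨c1, _ | ⟨c2, _ | ⟨c3, _ | ⟨c4, _ | ⟨c5, _ | ⟨c6, _ | ⟨c7, _ | ⟨c8, t⟩⟩⟩⟩⟩⟩⟩⟩⟩ <;>
      rw [e] at hl <;> simp at hl
    have hr1 : PySem.List.pyRange 0 3 1 = [0, 1, 2] := rfl
    have hr2 : PySem.List.pyRange 3 6 1 = [3, 4, 5] := rfl
    have hr3 : PySem.List.pyRange 6 8 1 = [6, 7] := rfl
    have g0 : PySem.List.pyGet? [c0, c1, c2, c3, c4, c5, c6, c7] (0 : Int) = some c0 := rfl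
    have g1 : PySem.List.pyGet? [c0, c1, c2, c3, c4, c5, c6, c7] (1 : Int) = some c1 := rfl
    have g2 : PySem.List.pyGet? [c0, c1, c2, c3, c4, c5, c6, c7] (2 : Int) = some c2 := rfl
    have g3 : PySem.List.pyGet? [c0, c1, c2, c3, c4, c5, c6, c7] (3 : Int) = some c3 := rfl
    have g4 : PySem.List.pyGet? [c0, c1, c2, c3, c4, c5, c6, c7] (4 : Int) = some c4 := rfl
    have g5 : PySem.List.pyGet? [c0, c1, c2, c3, c4, c5, c6, c7] (5 : Int) = some c5 := rfl
    have g6 : PySem.List.pyGet? [c0, c1, c2, c3, c4, c5, c6, c7] (6 : Int) = some c6 := rfl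
    have g7 : PySem.List.pyGet? [c0, c1, c2, c3, c4, c5, c6, c7] (7 : Int) = some c7 := rfl
    simp only [if_neg (show ¬(PySem.Str.len text ≠ 8) by simp only [ne_eq, not_not]; exact h8),
      hr1, hr2, hr3, List.foldl_cons, List.foldl_nil,
      g0, g1, g2, g3, g4, g5, g6, g7, Option.map_some, Option.getD_some, pv_ifAdd]
    generalize PySem.Chars.isdigit c0 = d0
    generalize PySem.Chars.isdigit c1 = d1
    generalize PySem.Chars.isdigit c2 = d2
    generalize PySem.Chars.isdigit c3 = d3
    generalize PySem.Chars.isdigit c4 = d4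
    generalize PySem.Chars.isdigit c5 = d5
    generalize PySem.Chars.isdigit c6 = d6
    generalize PySem.Chars.isdigit c7 = d7
    generalize PySem.Chars.isalpha c0 = a0
    generalize PySem.Chars.isalpha c1 = a1
    generalize PySem.Chars.isalpha c2 = a2
    generalize PySem.Chars.isalpha c3 = a3
    generalize PySem.Chars.isalpha c4 = a4
    generalize PySem.Chars.isalpha c5 = a5
    generalize PySem.Chars.isalpha c6 = a6
    generalize PySem.Chars.isalpha c7 = a7
    rw [pv_popD d0 d1 d2 d3 d4 d5 d6 d7, pv_popA a0 a1 a2 a3 a4 a5 a6 a7]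
    push_cast
    ring
  · have h8' : ¬ ((text.length : Int) = 8) := by simpa [PySem.Str.len] using h8
    simp [h8']
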